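-- pv_equiv track=rewrite | github.com/Aremaki/LongBEL | longbel/parse_data.py | _insert_entity_markers
-- ===== SOURCE A (Python) =====
-- def _insert_entity_markers(
--     text: str, spans: list[tuple[int, int]], start_entity: str, end_entity: str
-- ) -> str:
--     """Insert entity markers into text using original offsets, handling nested spans.
--
--     The insertion is done in a single pass using start/end events, so offsets
--     remain valid even when spans are nested or adjacent.
--     """
--     if not spans:
--         return text
--
--     text_len = len(text)
--     starts: dict[int, list[tuple[int, int]]] = {}
--     ends: dict[int, list[tuple[int, int]]] = {}
--
--     for start, end in spans:
--         if 0 <= start < end <= text_len: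
--             starts.setdefault(start, []).append((start, end))
--             ends.setdefault(end, []).append((start, end))
--
--     if not starts and not ends:
--         return text
--
--     positions = sorted(set(starts) | set(ends))
--     out: list[str] = []
--     last_idx = 0
--
--     for idx in positions:
--         if last_idx < idx:
--             out.append(text[last_idx:idx])
--
--         # Close inner spans first when multiple end at the same position
--         for _ in sorted(ends.get(idx, []), key=lambda x: x[0], reverse=True):
--             out.append(end_entity)
--
--         # Open outer spans first when multiple start at the same position
--         for _ in sorted(starts.get(idx, []), key=lambda x: x[1], reverse=True):
--             out.append(start_entity)
--
--         last_idx = idx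
--
--     if last_idx < text_len:
--         out.append(text[last_idx:])
--
--     return "".join(out)
-- ===== SOURCE B (Python) =====
-- def _insert_entity_markers(
--     text: str, spans: list[tuple[int, int]], start_entity: str, end_entity: str
-- ) -> str:
--     """Offset-indexed insertion tables + one linear scan (no dicts, no sorting)."""
--     n = len(text)
--     end_ins = [""] * (n + 1)
--     start_ins = [""] * (n + 1)
--     for start, end in spans:
--         if 0 <= start < end <= n:
--             end_ins[end] = end_ins[end] + end_entity
--             start_ins[start] = start_ins[start] + start_entity
--     parts = []
--     for i, ch in enumerate(text):
--         parts.append(end_ins[i])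
--         parts.append(start_ins[i])
--         parts.append(ch)
--     parts.append(end_ins[n])
--     parts.append(start_ins[n])
--     return "".join(parts)
-- ===== Notes on version B (the rewrite author's own statement) =====
-- stated objective: simpler
-- what changed: B replaces A's two dicts of span lists, the sorted set of event positions and the gap-slicing traversal by two offset-indexed insertion tables filled in one pass over the spans, followed by a single linear scan that emits end-markers, start-markers and the character at each offset.
import Mathlib
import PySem

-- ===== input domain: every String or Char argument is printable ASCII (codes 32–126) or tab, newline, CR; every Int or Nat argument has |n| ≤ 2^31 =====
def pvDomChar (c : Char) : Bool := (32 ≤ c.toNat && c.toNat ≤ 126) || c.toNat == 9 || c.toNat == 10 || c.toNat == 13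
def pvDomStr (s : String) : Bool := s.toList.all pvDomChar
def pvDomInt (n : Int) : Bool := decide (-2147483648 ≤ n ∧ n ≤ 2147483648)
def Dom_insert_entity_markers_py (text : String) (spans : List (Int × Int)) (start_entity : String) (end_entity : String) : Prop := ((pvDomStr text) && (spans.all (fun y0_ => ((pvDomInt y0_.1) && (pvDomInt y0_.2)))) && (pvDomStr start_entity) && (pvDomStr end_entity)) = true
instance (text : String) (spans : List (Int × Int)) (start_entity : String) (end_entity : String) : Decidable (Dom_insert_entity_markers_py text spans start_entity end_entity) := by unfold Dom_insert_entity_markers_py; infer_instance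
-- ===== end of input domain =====

-- B replaces A's dicts + sorting + event-position traversal by two offset-indexed
-- insertion tables and one linear left-to-right scan (objective: simpler).


-- ===== PORT A =====
-- Literal port of _insert_entity_markers.  'starts.setdefault(k, []).append(x)' is
-- 'Dict.modify k [] (· ++ [x])' (insert-or-append, position kept); the one Python
-- 'if 0 <= start < end <= text_len' guarding both dict updates is written once per
-- component of the pair state (same test, same updates).
def insert_entity_markers_py (text : String) (spans : List (Int × Int)) (start_entity : String) (end_entity : String) : String :=
  if spans = [] then text
  else
    let text_len : Int := (PySem.Str.len text : Int)
    let dicts := spans.foldl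
      (fun (p : PySem.Dict Int (List (Int × Int)) × PySem.Dict Int (List (Int × Int))) x =>
        (if 0 ≤ x.1 ∧ x.1 < x.2 ∧ x.2 ≤ text_len then p.1.modify x.1 [] (· ++ [x]) else p.1,
         if 0 ≤ x.1 ∧ x.1 < x.2 ∧ x.2 ≤ text_len then p.2.modify x.2 [] (· ++ [x]) else p.2))
      (PySem.Dict.empty, PySem.Dict.empty)
    let starts := dicts.1
    let ends := dicts.2
    if starts.size = 0 ∧ ends.size = 0 then text
    else
      let positions := PySem.List.sorted (PySem.Set.union (PySem.Set.ofList starts.keys) ends.keys) (fun x => x) false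
      let st := positions.foldl
        (fun (st : List String × Int) idx =>
          let out := if st.2 < idx then st.1 ++ [PySem.Str.slice text (some st.2) (some idx)] else st.1
          let out := (PySem.List.sorted (ends.getD idx []) (fun x => x.1) true).foldl (fun o _ => o ++ [end_entity]) out
          let out := (PySem.List.sorted (starts.getD idx []) (fun x => x.2) true).foldl (fun o _ => o ++ [start_entity]) out
          (out, idx))
        ([], 0)
      let out := if st.2 < text_len then st.1 ++ [PySem.Str.slice text (some st.2) none] else st.1
      PySem.Str.join "" out

-- ===== PORT B =====
-- Literal port of Source B: two (n+1)-slot string tables filled from the spans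
-- (end-marker table and start-marker table; the one guard written once per
-- component of the pair state), then one scan over enumerate(text).
def insert_entity_markers_py_alt (text : String) (spans : List (Int × Int)) (start_entity : String) (end_entity : String) : String :=
  let n : Int := PySem.Str.len text
  let tbls := spans.foldl
    (fun (p : List String × List String) x =>
      (if 0 ≤ x.1 ∧ x.1 < x.2 ∧ x.2 ≤ n then p.1.set x.2.toNat (p.1.getD x.2.toNat "" ++ end_entity) else p.1,
       if 0 ≤ x.1 ∧ x.1 < x.2 ∧ x.2 ≤ n then p.2.set x.1.toNat (p.2.getD x.1.toNat "" ++ start_entity) else p.2))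
    (List.replicate (n.toNat + 1) "", List.replicate (n.toNat + 1) "")
  let parts := (PySem.List.enumerate text.toList).foldl
    (fun ps ic => ps ++ [tbls.1.getD ic.1.toNat "", tbls.2.getD ic.1.toNat "", String.ofList [ic.2]]) []
  let parts := parts ++ [tbls.1.getD n.toNat "", tbls.2.getD n.toNat ""]
  PySem.Str.join "" parts

-- ===== PRECONDITION & SPEC =====
def Spec_insert_entity_markers_py (text : String) (spans : List (Int × Int)) (start_entity : String) (end_entity : String) (out : String) : Prop := out = insert_entity_markers_py_alt text spans start_entity end_entity
instance (text : String) (spans : List (Int × Int)) (start_entity : String) (end_entity : String) (out : String) : Decidable (Spec_insert_entity_markers_py text spans start_entity end_entity out) := by unfold Spec_insert_entity_markers_py; infer_instance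

-- ===== CLAIM (what is proved, stated in full; the proofs are below) =====
def Claim_equal_insert_entity_markers_py : Prop := ∀ (text : String) (spans : List (Int × Int)) (start_entity : String) (end_entity : String), Dom_insert_entity_markers_py text spans start_entity end_entity → Spec_insert_entity_markers_py text spans start_entity end_entity (insert_entity_markers_py text spans start_entity end_entity)

-- ===== LEMMAS AND PROOFS =====

def joinL (l : List String) : List Char := (l.map String.toList).flatten

-- The valid spans, and the combined marker block inserted at offset i:
-- end_entity once per valid span ending at i, then start_entity once per valid span starting at i.
def pvValid (n : Int) (spans : List (Int × Int)) : List (Int × Int) :=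
  spans.filter (fun x => decide (0 ≤ x.1 ∧ x.1 < x.2 ∧ x.2 ≤ n))

def pvMk (valid : List (Int × Int)) (endL startL : List Char) (i : Int) : List Char :=
  (List.replicate (valid.filter (fun x => x.2 == i)).length endL).flatten ++
  (List.replicate (valid.filter (fun x => x.1 == i)).length startL).flatten

-- remaining output of A's loop after the markers at offset k have just been emitted
def pvTail (mk : Int → List Char) : List Char → Int → List Char
  | [], _ => []
  | c :: cs, k => c :: (mk (k + 1) ++ pvTail mk cs (k + 1))

-- B's scan: markers-before-character at each offset (final markers added separately)
def pvScan (mk : Int → List Char) : List Char → Int → List Char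
  | [], _ => []
  | c :: cs, k => mk k ++ c :: pvScan mk cs (k + 1)

theorem pvScan_tail (mk : Int → List Char) (cs : List Char) (k : Int) :
    pvScan mk cs k ++ mk (k + cs.length) = mk k ++ pvTail mk cs k := by
  induction cs generalizing k with
  | nil => simp [pvScan, pvTail]
  | cons c cs ih =>
    simp only [pvScan, pvTail, List.length_cons, List.cons_append, List.append_assoc]
    have h : k + ((cs.length : Int) + 1) = (k + 1) + (cs.length : Int) := by ring
    push_cast
    rw [h, ih (k + 1)]

theorem pvScan_congr (mk mk' : Int → List Char) (cs : List Char) (k : Int)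
    (h : ∀ i : Int, k ≤ i → i < k + cs.length → mk i = mk' i) :
    pvScan mk cs k = pvScan mk' cs k := by
  induction cs generalizing k with
  | nil => rfl
  | cons c cs ih =>
    simp only [pvScan]
    rw [h k (le_refl k) (by simp only [List.length_cons]; push_cast; omega), ih (k + 1) (fun i h1 h2 => h i (by omega) (by simp only [List.length_cons] at h2 ⊢; push_cast at h2 ⊢; omega))]

theorem pvTail_all_empty (mk : Int → List Char) (cs : List Char) (k : Int)
    (h : ∀ i : Int, k < i → i ≤ k + cs.length → mk i = []) :
    pvTail mk cs k = cs := by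
  induction cs generalizing k with
  | nil => rfl
  | cons c cs ih =>
    simp only [pvTail]
    rw [h (k + 1) (by omega) (by simp only [List.length_cons]; push_cast; omega), ih (k + 1) (fun i h1 h2 => h i (by omega) (by simp only [List.length_cons] at h2 ⊢; push_cast at h2 ⊢; omega))]
    simp

theorem pvTail_split (mk : Int → List Char) (d : Nat) (hd : 0 < d) :
    ∀ (cs : List Char) (k : Int), d ≤ cs.length →
    (∀ i : Int, k < i → i < k + d → mk i = []) →
    pvTail mk cs k = cs.take d ++ mk (k + d) ++ pvTail mk (cs.drop d) (k + d) := by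
  induction d with
  | zero => omega
  | succ d ih =>
    intro cs k hlen hz
    cases cs with
    | nil => simp at hlen
    | cons c cs =>
      by_cases hd0 : d = 0
      · subst hd0
        simp [pvTail]
      · have hmk1 : mk (k + 1) = [] := hz (k + 1) (by omega) (by push_cast; omega)
        simp only [pvTail, hmk1, List.nil_append]
        rw [ih (by omega) cs (k + 1) (by simp at hlen; omega)
            (fun i h1 h2 => hz i (by omega) (by push_cast at h2 ⊢; omega))]
        have e1 : (k + 1) + (d : Int) = k + ((d + 1 : Nat) : Int) := by push_cast; ring
        simp only [e1, List.take_succ_cons, List.drop_succ_cons, List.cons_append, List.append_assoc]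

theorem flatten_intersperse_nil {α : Type} (l : List (List α)) :
    (List.intersperse ([] : List α) l).flatten = l.flatten := by
  induction l with
  | nil => rfl
  | cons x xs ih =>
    cases xs with
    | nil => rfl
    | cons y ys => simp_all [List.intersperse]

theorem joinL_eq (l : List String) : (PySem.Str.join "" l).toList = joinL l := by
  rw [PySem.Str.toList_join]
  show PySem.Chars.join "".toList _ = _
  simp [PySem.Chars.join, List.intercalate, flatten_intersperse_nil, joinL]

theorem joinL_append (l₁ l₂ : List String) : joinL (l₁ ++ l₂) = joinL l₁ ++ joinL l₂ := by
  simp [joinL]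

-- A's event loop, emission per position abstracted to mkS (a list of marker strings)
theorem loopA (text : String) (mkS : Int → List String) (mk : Int → List Char)
    (hmk : ∀ i, joinL (mkS i) = mk i) :
    ∀ (P : List Int) (out : List String) (last : Int),
    P.Pairwise (· < ·) → (∀ p ∈ P, last < p ∧ p ≤ (text.toList.length : Int)) →
    0 ≤ last → last ≤ (text.toList.length : Int) →
    (∀ i : Int, last < i → i ≤ (text.toList.length : Int) → i ∉ P → mk i = []) →
    joinL (if (P.foldl (fun (st : List String × Int) idx =>
             ((if st.2 < idx then st.1 ++ [PySem.Str.slice text (some st.2) (some idx)] else st.1) ++ mkS idx, idx)) (out, last)).2 < (text.toList.length : Int)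
           then (P.foldl (fun (st : List String × Int) idx =>
             ((if st.2 < idx then st.1 ++ [PySem.Str.slice text (some st.2) (some idx)] else st.1) ++ mkS idx, idx)) (out, last)).1 ++ [PySem.Str.slice text (some (P.foldl (fun (st : List String × Int) idx =>
             ((if st.2 < idx then st.1 ++ [PySem.Str.slice text (some st.2) (some idx)] else st.1) ++ mkS idx, idx)) (out, last)).2) none]
           else (P.foldl (fun (st : List String × Int) idx =>
             ((if st.2 < idx then st.1 ++ [PySem.Str.slice text (some st.2) (some idx)] else st.1) ++ mkS idx, idx)) (out, last)).1)
      = joinL out ++ pvTail mk (text.toList.drop last.toNat) last := by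
  intro P
  induction P with
  | nil =>
    intro out last _ _ h0 hn hz
    simp only [List.foldl_nil]
    by_cases hlt : last < (text.toList.length : Int)
    · rw [if_pos hlt]
      have hs : (PySem.Str.slice text (some last) none).toList = text.toList.drop last.toNat := by
        rw [PySem.Str.toList_slice]
        simp only [PySem.Chars.slice_eq_listSlice]
        exact PySem.List.slice_from text.toList h0
      rw [pvTail_all_empty mk _ last (fun i h1 h2 => hz i h1
        (by rw [List.length_drop] at h2; omega) (by simp))]
      rw [joinL_append]
      simp [joinL, hs]
    · rw [if_neg hlt]
      have hend : text.toList.drop last.toNat = [] := by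
        rw [List.drop_eq_nil_iff]
        omega
      rw [hend]
      simp [pvTail]
  | cons p P ih =>
    intro out last hpw hp h0 hn hz
    obtain ⟨hlp, hpn⟩ := hp p List.mem_cons_self
    have hp0 : 0 ≤ p := le_trans h0 (le_of_lt hlp)
    simp only [List.foldl_cons]
    rw [show ((if (out, last).2 < p then (out, last).1 ++ [PySem.Str.slice text (some (out, last).2) (some p)] else (out, last).1) ++ mkS p, p)
        = (out ++ [PySem.Str.slice text (some last) (some p)] ++ mkS p, p) from by rw [if_pos hlp]]
    rw [ih (out ++ [PySem.Str.slice text (some last) (some p)] ++ mkS p) p hpw.of_cons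
        (fun q hq => ⟨(List.pairwise_cons.mp hpw).1 q hq, (hp q (List.mem_cons_of_mem p hq)).2⟩)
        hp0 hpn
        (fun i h1 h2 hni => hz i (lt_trans hlp h1) h2 (by
          intro hmem
          rcases List.mem_cons.mp hmem with h | h
          · omega
          · exact hni h))]
    rw [joinL_append, joinL_append, hmk]
    have hslice : (PySem.Str.slice text (some last) (some p)).toList
        = (text.toList.drop last.toNat).take (p.toNat - last.toNat) := by
      rw [PySem.Str.toList_slice]
      simp only [PySem.Chars.slice_eq_listSlice]
      rw [show last = ((last.toNat : Nat) : Int) by omega, show p = ((p.toNat : Nat) : Int) by omega]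
      rw [PySem.List.slice_natCast]
      rw [Int.toNat_natCast, Int.toNat_natCast]
    have hd : 0 < p.toNat - last.toNat := by omega
    rw [pvTail_split mk (p.toNat - last.toNat) hd (text.toList.drop last.toNat) last
        (by rw [List.length_drop]; omega)
        (fun i h1 h2 => by
          refine hz i h1 (by omega) ?_
          intro hmem
          rcases List.mem_cons.mp hmem with h | h
          · omega
          · have := (List.pairwise_cons.mp hpw).1 i h
            omega)]
    have harg : last + ((p.toNat - last.toNat : Nat) : Int) = p := by omega
    rw [harg, List.drop_drop, show last.toNat + (p.toNat - last.toNat) = p.toNat by omega]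
    simp [joinL, hslice]

-- 'setdefault(k, []).append(x)' loop: the final value at c is the sub-list of l keyed to c
theorem getD_foldl_modify_key {β : Type} (key : β → Int) :
    ∀ (l : List β) (d : PySem.Dict Int (List β)) (c : Int),
    (l.foldl (fun d x => d.modify (key x) [] (· ++ [x])) d).getD c []
      = d.getD c [] ++ l.filter (fun x => key x == c) := by
  intro l
  induction l with
  | nil => simp
  | cons x l ih =>
    intro d c
    simp only [List.foldl_cons, List.filter_cons]
    rw [ih, PySem.Dict.getD_modify]
    by_cases h : c = key x
    · rw [if_pos h, if_pos (by simp [h])]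
      rw [h]
      simp
    · rw [if_neg h, if_neg (by simp; omega)]

-- B's insertion-table loop: the final string at slot i is one 'ent' per element of l keyed to i
theorem tbl_getD (key : (Int × Int) → Int) (ent : String) (m : Nat) :
    ∀ (l : List (Int × Int)) (t : List String),
    t.length = m + 1 → (∀ x ∈ l, 0 ≤ key x ∧ key x ≤ (m : Int)) → ∀ i : Nat, i ≤ m →
    ((l.foldl (fun t x => t.set (key x).toNat (t.getD (key x).toNat "" ++ ent)) t).getD i "").toList
      = (t.getD i "").toList ++ (List.replicate (l.filter (fun x => key x == (i : Int))).length ent.toList).flatten := by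
  intro l
  induction l with
  | nil => intro t _ _ i _; simp
  | cons x l ih =>
    intro t htlen hb i hi
    obtain ⟨hx0, hxm⟩ := hb x List.mem_cons_self
    simp only [List.foldl_cons, List.filter_cons]
    rw [ih (t.set (key x).toNat (t.getD (key x).toNat "" ++ ent))
        (by rw [List.length_set]; exact htlen)
        (fun y hy => hb y (List.mem_cons_of_mem _ hy)) i hi]
    have hkey : (key x).toNat < t.length := by omega
    by_cases h : (key x).toNat = i
    · rw [if_pos (by simp; omega)]
      rw [List.getD_eq_getElem?_getD, List.getElem?_set, if_pos h, if_pos (h ▸ hkey)]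
      simp only [Option.getD_some, String.toList_append, List.length_cons, List.replicate_succ,
        List.flatten_cons, List.append_assoc]
      congr 2
      rw [List.getD_eq_getElem?_getD, h, ← List.getD_eq_getElem?_getD]
    · rw [if_neg (by simp; omega)]
      rw [List.getD_eq_getElem?_getD, List.getElem?_set, if_neg h, ← List.getD_eq_getElem?_getD]

-- B's scan loop over enumerate(text)
theorem parts_fold (f g : Int → String) :
    ∀ (cs : List Char) (k : Int) (ps : List String),
    joinL ((PySem.List.enumerate cs k).foldl (fun ps ic => ps ++ [f ic.1, g ic.1, String.ofList [ic.2]]) ps)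
      = joinL ps ++ pvScan (fun i => (f i).toList ++ (g i).toList) cs k := by
  intro cs
  induction cs with
  | nil => intro k ps; simp [PySem.List.enumerate, pvScan, joinL]
  | cons c cs ih =>
    intro k ps
    rw [show PySem.List.enumerate (c :: cs) k = (k, c) :: PySem.List.enumerate cs (k + 1) from by
      simp [PySem.List.enumerate]]
    simp only [List.foldl_cons]
    rw [ih (k + 1) (ps ++ [f k, g k, String.ofList [c]])]
    simp [joinL, pvScan, List.append_assoc]

theorem pvMk_eq_nil (valid : List (Int × Int)) (eL sL : List Char) (i : Int)
    (h2 : valid.filter (fun x => x.2 == i) = []) (h1 : valid.filter (fun x => x.1 == i) = []) :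
    pvMk valid eL sL i = [] := by
  simp [pvMk, h1, h2]

-- B characterised: final-markers-first form via pvScan/pvTail bridge
theorem valid_bounds (n : Int) (spans : List (Int × Int)) :
    ∀ x ∈ pvValid n spans, 0 ≤ x.1 ∧ x.1 < x.2 ∧ x.2 ≤ n := by
  intro x hx
  have := List.of_mem_filter hx
  simpa using this

-- B characterised: leading-markers form via the pvScan/pvTail bridge
theorem alt_eq (text : String) (spans : List (Int × Int)) (start_entity end_entity : String) :
    (insert_entity_markers_py_alt text spans start_entity end_entity).toList
      = pvMk (pvValid (text.toList.length : Int) spans) end_entity.toList start_entity.toList 0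
        ++ pvTail (pvMk (pvValid (text.toList.length : Int) spans) end_entity.toList start_entity.toList)
             text.toList 0 := by
  unfold insert_entity_markers_py_alt
  dsimp only
  rw [PySem.List.foldl_prod_mk
      (fun (t : List String) (x : Int × Int) =>
        if 0 ≤ x.1 ∧ x.1 < x.2 ∧ x.2 ≤ PySem.Str.len text
        then t.set x.2.toNat (t.getD x.2.toNat "" ++ end_entity) else t)
      (fun (t : List String) (x : Int × Int) =>
        if 0 ≤ x.1 ∧ x.1 < x.2 ∧ x.2 ≤ PySem.Str.len text
        then t.set x.1.toNat (t.getD x.1.toNat "" ++ start_entity) else t)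
      spans (List.replicate ((PySem.Str.len text).toNat + 1) "") (List.replicate ((PySem.Str.len text).toNat + 1) "")]
  rw [PySem.List.foldl_ite_eq_foldl_filter, PySem.List.foldl_ite_eq_foldl_filter]
  have hv : pvValid (PySem.Str.len text) spans
      = spans.filter (fun x => decide (0 ≤ x.1 ∧ x.1 < x.2 ∧ x.2 ≤ PySem.Str.len text)) := rfl
  rw [← hv]
  simp only [PySem.Str.len_eq, Int.toNat_natCast]
  rw [joinL_eq, joinL_append]
  rw [parts_fold (fun i => (((pvValid (text.toList.length : Int) spans).foldl
        (fun t x => t.set x.2.toNat (t.getD x.2.toNat "" ++ end_entity))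
        (List.replicate (text.toList.length + 1) "")).getD i.toNat ""))
      (fun i => (((pvValid (text.toList.length : Int) spans).foldl
        (fun t x => t.set x.1.toNat (t.getD x.1.toNat "" ++ start_entity))
        (List.replicate (text.toList.length + 1) "")).getD i.toNat ""))
      text.toList 0 []]
  have hvb := valid_bounds (text.toList.length : Int) spans
  have hE : ∀ i : Nat, i ≤ text.toList.length →
      (((pvValid (text.toList.length : Int) spans).foldl
        (fun t x => t.set x.2.toNat (t.getD x.2.toNat "" ++ end_entity))
        (List.replicate (text.toList.length + 1) "")).getD i "").toList
      = (List.replicate ((pvValid (text.toList.length : Int) spans).filter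
          (fun x => x.2 == (i : Int))).length end_entity.toList).flatten := by
    intro i hi
    rw [tbl_getD (fun x => x.2) end_entity text.toList.length _ _
        (by simp [List.length_replicate])
        (fun x hx => by
          obtain ⟨h1, h2, h3⟩ := hvb x hx
          exact ⟨le_of_lt (lt_of_le_of_lt h1 h2), h3⟩) i hi]
    simp
  have hS : ∀ i : Nat, i ≤ text.toList.length →
      (((pvValid (text.toList.length : Int) spans).foldl
        (fun t x => t.set x.1.toNat (t.getD x.1.toNat "" ++ start_entity))
        (List.replicate (text.toList.length + 1) "")).getD i "").toList
      = (List.replicate ((pvValid (text.toList.length : Int) spans).filter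
          (fun x => x.1 == (i : Int))).length start_entity.toList).flatten := by
    intro i hi
    rw [tbl_getD (fun x => x.1) start_entity text.toList.length _ _
        (by simp [List.length_replicate])
        (fun x hx => by
          obtain ⟨h1, h2, h3⟩ := hvb x hx
          exact ⟨h1, le_trans (le_of_lt h2) h3⟩) i hi]
    simp
  rw [pvScan_congr _ (pvMk (pvValid (text.toList.length : Int) spans) end_entity.toList start_entity.toList)
      text.toList 0
      (fun i h1 h2 => by
        have hile : i.toNat ≤ text.toList.length := by
          simp only [zero_add] at h2; omega
        have hii : ((i.toNat : Nat) : Int) = i := by omega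
        rw [hE i.toNat hile, hS i.toNat hile, hii]
        rfl)]
  rw [← pvScan_tail]
  have h0len : (0 : Int) + (text.toList.length : Int) = (text.toList.length : Int) := by ring
  rw [h0len]
  congr 1
  simp only [joinL, List.map_cons, List.map_nil, List.flatten_cons, List.flatten_nil, List.append_nil]
  rw [hE text.toList.length (le_refl _), hS text.toList.length (le_refl _)]
  simp [pvMk]

theorem joinL_map_const {α : Type} (l : List α) (s : String) :
    joinL (l.map (fun _ => s)) = (List.replicate l.length s.toList).flatten := by
  simp only [joinL, List.map_map]
  rw [show ((String.toList ∘ fun _ => s) : α → List Char) = fun _ => s.toList from rfl]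
  rw [List.map_const']

-- A's whole event traversal from the initial state ([], 0)
theorem loopA_top (text : String) (mkS : Int → List String) (mk : Int → List Char)
    (hmk : ∀ i, joinL (mkS i) = mk i) (P : List Int)
    (hpw : P.Pairwise (· < ·)) (hbnd : ∀ p ∈ P, 0 ≤ p ∧ p ≤ (text.toList.length : Int))
    (hz : ∀ i : Int, 0 ≤ i → i ≤ (text.toList.length : Int) → i ∉ P → mk i = []) :
    joinL (if (P.foldl (fun (st : List String × Int) idx =>
             ((if st.2 < idx then st.1 ++ [PySem.Str.slice text (some st.2) (some idx)] else st.1) ++ mkS idx, idx)) ([], 0)).2 < (text.toList.length : Int)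
           then (P.foldl (fun (st : List String × Int) idx =>
             ((if st.2 < idx then st.1 ++ [PySem.Str.slice text (some st.2) (some idx)] else st.1) ++ mkS idx, idx)) ([], 0)).1 ++ [PySem.Str.slice text (some (P.foldl (fun (st : List String × Int) idx =>
             ((if st.2 < idx then st.1 ++ [PySem.Str.slice text (some st.2) (some idx)] else st.1) ++ mkS idx, idx)) ([], 0)).2) none]
           else (P.foldl (fun (st : List String × Int) idx =>
             ((if st.2 < idx then st.1 ++ [PySem.Str.slice text (some st.2) (some idx)] else st.1) ++ mkS idx, idx)) ([], 0)).1)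
      = mk 0 ++ pvTail mk text.toList 0 := by
  by_cases h0 : (0 : Int) ∈ P
  · cases P with
    | nil => simp at h0
    | cons p rest =>
      have hp0 : p = 0 := by
        rcases List.mem_cons.mp h0 with h | h
        · omega
        · have h1 := (List.pairwise_cons.mp hpw).1 0 h
          have h2 := (hbnd p List.mem_cons_self).1
          omega
      subst hp0
      simp only [List.foldl_cons]
      rw [show ((if ((([] : List String), (0:Int)).2 < (0:Int)) then ([] : List String) ++ [PySem.Str.slice text (some (([] : List String), (0:Int)).2) (some 0)] else ([] : List String)) ++ mkS 0, (0:Int))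
          = (([] : List String) ++ mkS 0, (0:Int)) from by rw [if_neg (lt_irrefl 0)]]
      rw [loopA text mkS mk hmk rest ([] ++ mkS 0) 0 hpw.of_cons
          (fun q hq => ⟨by
              have := (List.pairwise_cons.mp hpw).1 q hq
              omega, (hbnd q (List.mem_cons_of_mem _ hq)).2⟩)
          (le_refl 0) (by positivity)
          (fun i h1 h2 hni => hz i (le_of_lt h1) h2 (by
            intro hmem
            rcases List.mem_cons.mp hmem with h | h
            · omega
            · exact hni h))]
      rw [joinL_append, hmk]
      simp [joinL]
  · rw [loopA text mkS mk hmk P [] 0 hpw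
        (fun q hq => ⟨by
            have h1 := (hbnd q hq).1
            rcases lt_or_eq_of_le h1 with h | h
            · exact h
            · exact absurd (h ▸ hq) h0, (hbnd q hq).2⟩)
        (le_refl 0) (by positivity)
        (fun i h1 h2 hni => hz i (le_of_lt h1) h2 hni)]
    rw [hz 0 (le_refl 0) (by positivity) h0]
    simp [joinL]

theorem sorted_length {α κ : Type} [LinearOrder κ] (xs : List α) (key : α → κ) (rev : Bool) :
    (PySem.List.sorted xs key rev).length = xs.length :=
  (PySem.List.sorted_perm xs key rev).length_eq

-- ===== VERDICT (by name: the statement is the Claim_ definition above) =====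
set_option maxHeartbeats 2000000 in
theorem insert_entity_markers_py_spec : Claim_equal_insert_entity_markers_py := by
  unfold Claim_equal_insert_entity_markers_py
  intro text spans start_entity end_entity _
  unfold Spec_insert_entity_markers_py
  refine String.toList_inj.mp ?_
  rw [alt_eq]
  unfold insert_entity_markers_py
  dsimp only
  by_cases hsp : spans = []
  · rw [if_pos hsp]
    subst hsp
    have hmkz : ∀ i : Int, pvMk (pvValid (text.toList.length : Int) []) end_entity.toList start_entity.toList i = [] := by
      intro i; simp [pvValid, pvMk]
    rw [hmkz 0, pvTail_all_empty _ _ _ (fun i _ _ => hmkz i)]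
    simp
  · rw [if_neg hsp]
    rw [PySem.Str.len_eq text]
    rw [PySem.List.foldl_prod_mk
        (fun (d : PySem.Dict Int (List (Int × Int))) (x : Int × Int) =>
          if 0 ≤ x.1 ∧ x.1 < x.2 ∧ x.2 ≤ ((text.toList.length : Nat) : Int) then d.modify x.1 [] (· ++ [x]) else d)
        (fun (d : PySem.Dict Int (List (Int × Int))) (x : Int × Int) =>
          if 0 ≤ x.1 ∧ x.1 < x.2 ∧ x.2 ≤ ((text.toList.length : Nat) : Int) then d.modify x.2 [] (· ++ [x]) else d)
        spans PySem.Dict.empty PySem.Dict.empty]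
    rw [PySem.List.foldl_ite_eq_foldl_filter, PySem.List.foldl_ite_eq_foldl_filter]
    have hv : pvValid (text.toList.length : Int) spans
        = spans.filter (fun x => decide (0 ≤ x.1 ∧ x.1 < x.2 ∧ x.2 ≤ ((text.toList.length : Nat) : Int))) := rfl
    rw [← hv]
    by_cases hval : pvValid (text.toList.length : Int) spans = []
    · rw [hval]
      simp only [List.foldl_nil]
      rw [if_pos ⟨by simp [PySem.Dict.size, PySem.Dict.empty], by simp [PySem.Dict.size, PySem.Dict.empty]⟩]
      have hmkz : ∀ i : Int, pvMk [] end_entity.toList start_entity.toList i = [] := by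
        intro i; simp [pvMk]
      rw [hmkz 0, pvTail_all_empty _ _ _ (fun i _ _ => hmkz i)]
      simp
    · -- main case: at least one valid span
      have hvb0 := valid_bounds (text.toList.length : Int) spans
      generalize hV : pvValid (text.toList.length : Int) spans = V at hval hvb0 ⊢
      obtain ⟨v, hvmem⟩ := List.exists_mem_of_ne_nil _ hval
      generalize hSD : V.foldl (fun d x => d.modify x.1 [] (· ++ [x])) PySem.Dict.empty = SD
      generalize hED : V.foldl (fun d x => d.modify x.2 [] (· ++ [x])) PySem.Dict.empty = ED
      have hkeysS : SD.keys = PySem.Set.ofList (V.map (fun p : Int × Int => p.1)) := by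
        rw [← hSD, PySem.Dict.keys_foldl_modify_key V (fun p : Int × Int => p.1) []
            (fun _ x => (· ++ [x])) PySem.Dict.empty]
        simp [PySem.Set.update_nil_left]
      have hkeysE : ED.keys = PySem.Set.ofList (V.map (fun p : Int × Int => p.2)) := by
        rw [← hED, PySem.Dict.keys_foldl_modify_key V (fun p : Int × Int => p.2) []
            (fun _ x => (· ++ [x])) PySem.Dict.empty]
        simp [PySem.Set.update_nil_left]
      have hgS : ∀ idx : Int, SD.getD idx [] = V.filter (fun x => x.1 == idx) := by
        intro idx
        rw [← hSD, getD_foldl_modify_key (fun p : Int × Int => p.1) V PySem.Dict.empty idx]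
        simp
      have hgE : ∀ idx : Int, ED.getD idx [] = V.filter (fun x => x.2 == idx) := by
        intro idx
        rw [← hED, getD_foldl_modify_key (fun p : Int × Int => p.2) V PySem.Dict.empty idx]
        simp
      rw [if_neg (by
        intro hand
        have hlen0 : SD.keys.length = 0 := by
          simp only [PySem.Dict.keys, List.length_map]
          exact hand.1
        rw [hkeysS, List.length_eq_zero_iff] at hlen0
        have hmem : v.1 ∈ PySem.Set.ofList (V.map (fun p : Int × Int => p.1)) :=
          (PySem.Set.mem_ofList _ _).mpr (List.mem_map.mpr ⟨v, hvmem, rfl⟩)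
        rw [hlen0] at hmem
        simp at hmem)]
      rw [joinL_eq]
      have hmk : ∀ i : Int, joinL
          ((PySem.List.sorted (ED.getD i []) (fun x => x.1) true).map (fun _ => end_entity)
            ++ (PySem.List.sorted (SD.getD i []) (fun x => x.2) true).map (fun _ => start_entity))
          = pvMk V end_entity.toList start_entity.toList i := by
        intro i
        rw [joinL_append, joinL_map_const, joinL_map_const, sorted_length, sorted_length, hgS i, hgE i]
        rfl
      have hperm := PySem.List.sorted_perm
        (PySem.Set.union (PySem.Set.ofList SD.keys) ED.keys) (fun x => x) false
      have hmempos : ∀ q : Int,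
          q ∈ PySem.List.sorted (PySem.Set.union (PySem.Set.ofList SD.keys) ED.keys) (fun x => x) false
          ↔ ((∃ x ∈ V, x.1 = q) ∨ (∃ x ∈ V, x.2 = q)) := by
        intro q
        rw [hperm.mem_iff, PySem.Set.mem_union, hkeysS, hkeysE, PySem.Set.ofList_ofList,
            PySem.Set.mem_ofList, PySem.Set.mem_ofList]
        simp [List.mem_map, eq_comm]
      have hbnd : ∀ q ∈ PySem.List.sorted
          (PySem.Set.union (PySem.Set.ofList SD.keys) ED.keys) (fun x => x) false,
          0 ≤ q ∧ q ≤ (text.toList.length : Int) := by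
        intro q hq
        rcases (hmempos q).mp hq with ⟨x, hx, hxq⟩ | ⟨x, hx, hxq⟩ <;>
          · obtain ⟨h1, h2, h3⟩ := hvb0 x hx
            omega
      have hpw : (PySem.List.sorted
          (PySem.Set.union (PySem.Set.ofList SD.keys) ED.keys) (fun x => x) false).Pairwise (· < ·) := by
        have hnodup := hperm.nodup_iff.mpr
          (PySem.Set.nodup_union _ _ (PySem.Set.nodup_ofList _))
        have hle := PySem.List.sorted_pairwise
          (PySem.Set.union (PySem.Set.ofList SD.keys) ED.keys) (fun x => x)
        exact (hle.and hnodup).imp (fun h => lt_of_le_of_ne h.1 h.2)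
      have hz : ∀ i : Int, 0 ≤ i → i ≤ (text.toList.length : Int) →
          i ∉ PySem.List.sorted (PySem.Set.union (PySem.Set.ofList SD.keys) ED.keys) (fun x => x) false →
          pvMk V end_entity.toList start_entity.toList i = [] := by
        intro i _ _ hni
        refine pvMk_eq_nil _ _ _ _ ?_ ?_ <;>
          · rw [List.filter_eq_nil_iff]
            intro a ha hcon
            exact hni ((hmempos i).mpr (by
              first
              | exact Or.inr ⟨a, ha, by simpa using hcon⟩
              | exact Or.inl ⟨a, ha, by simpa using hcon⟩))
      have hstep : (fun (st : List String × Int) (idx : Int) =>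
          ((PySem.List.sorted (SD.getD idx []) (fun x => x.2) true).foldl
            (fun o _ => o ++ [start_entity])
            ((PySem.List.sorted (ED.getD idx []) (fun x => x.1) true).foldl
              (fun o _ => o ++ [end_entity])
              (if st.2 < idx then st.1 ++ [PySem.Str.slice text (some st.2) (some idx)] else st.1)), idx))
          = (fun (st : List String × Int) (idx : Int) =>
          ((if st.2 < idx then st.1 ++ [PySem.Str.slice text (some st.2) (some idx)] else st.1)
            ++ ((PySem.List.sorted (ED.getD idx []) (fun x => x.1) true).map (fun _ => end_entity)
              ++ (PySem.List.sorted (SD.getD idx []) (fun x => x.2) true).map (fun _ => start_entity)), idx)) := by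
        funext st idx
        rw [PySem.List.foldl_append_singleton_eq_map (fun _ => end_entity),
            PySem.List.foldl_append_singleton_eq_map (fun _ => start_entity), List.append_assoc]
      rw [hstep]
      exact loopA_top text
        (fun idx => (PySem.List.sorted (ED.getD idx []) (fun x => x.1) true).map (fun _ => end_entity)
          ++ (PySem.List.sorted (SD.getD idx []) (fun x => x.2) true).map (fun _ => start_entity))
        (pvMk V end_entity.toList start_entity.toList)
        hmk _ hpw hbnd hz
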